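-- pv_equiv track=rewrite | github.com/yang19-zzy/prime_webtool | app/utils/data_parser.py | prefix_to_json
-- ===== SOURCE A (Python) =====
-- from collections import defaultdict
--
-- def prefix_to_json(prefixes):
--     result = defaultdict(set)
--
--     for prefix in prefixes:
--         parts = prefix.strip('/').split('/')
--         if len(parts) >= 2:
--             top_level = parts[0]
--             sub_folder = parts[1]
--             result[top_level].add(sub_folder)
--
--     return {
--         "data_source": {
--             k: sorted(v) for k, v in result.items()
--         }
--     }
-- ===== SOURCE B (Python) =====
-- def _insert_sorted_unique(lst, x):
--     # insert x into the sorted duplicate-free list lst, keeping it sorted; no-op if present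
--     i = 0
--     n = len(lst)
--     while i < n and lst[i] < x:
--         i += 1
--     if i < n and lst[i] == x:
--         return lst
--     return lst[:i] + [x] + lst[i:]
--
-- def prefix_to_json(prefixes):
--     folders = {}
--     for prefix in prefixes:
--         parts = prefix.strip('/').split('/')
--         if len(parts) >= 2:
--             top = parts[0]
--             sub = parts[1]
--             folders[top] = _insert_sorted_unique(folders.get(top, []), sub)
--     return {"data_source": folders}
-- ===== Notes on version B (the rewrite author's own statement) =====
-- stated objective: alternative
-- what changed: Instead of accumulating sub-folders in a defaultdict of sets and sorting every set in a final pass, B keeps each top-level's sub-folder list sorted and duplicate-free at all times via an in-place sorted insertion, so the result dict is the answer with no post-processing pass.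
import Mathlib
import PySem

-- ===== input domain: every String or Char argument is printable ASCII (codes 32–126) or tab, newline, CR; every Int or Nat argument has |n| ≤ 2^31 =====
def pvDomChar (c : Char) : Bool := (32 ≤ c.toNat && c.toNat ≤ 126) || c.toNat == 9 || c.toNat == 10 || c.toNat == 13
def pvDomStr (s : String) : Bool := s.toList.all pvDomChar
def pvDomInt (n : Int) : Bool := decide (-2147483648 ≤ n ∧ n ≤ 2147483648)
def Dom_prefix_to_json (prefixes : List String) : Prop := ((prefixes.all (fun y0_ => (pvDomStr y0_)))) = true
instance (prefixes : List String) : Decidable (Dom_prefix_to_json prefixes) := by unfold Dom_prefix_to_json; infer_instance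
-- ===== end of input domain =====

-- B replaces A's defaultdict-of-sets + final per-key sort by a dict whose sub-folder
-- lists are kept sorted and duplicate-free incrementally (sorted insertion); alternative, not faster.

-- ===== PORT A =====
-- parts = prefix.strip('/').split('/')
def pvPartsA (p : String) : List String :=
  (PySem.Chars.splitOn (PySem.Chars.stripChars p.toList ['/']) ['/']).map String.ofList

def prefix_to_json (prefixes : List String) : List (String × List (String × List String)) :=
  let result : PySem.Dict String (PySem.Set String) :=
    prefixes.foldl (fun d p =>
      match pvPartsA p with
      | top_level :: sub_folder :: _ =>
          -- result[top_level].add(sub_folder)  (defaultdict(set))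
          d.modify top_level PySem.Set.empty (fun v => v.add sub_folder)
      | _ => d) PySem.Dict.empty
  [("data_source", result.items.map (fun kv => (kv.1, PySem.List.sorted kv.2 (fun x => x))))]

-- ===== PORT B =====
-- parts = prefix.strip('/').split('/')  (same line in Source B)
def pvPartsB (p : String) : List String :=
  (PySem.Chars.splitOn (PySem.Chars.stripChars p.toList ['/']) ['/']).map String.ofList

-- _insert_sorted_unique: scan to the insertion point, no-op on an exact match
def pvIsuFind (lst : List String) (x : String) : Nat :=
  match lst with
  | [] => 0
  | y :: ys => if y < x then pvIsuFind ys x + 1 else 0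

def insertSortedUnique (lst : List String) (x : String) : List String :=
  let i := pvIsuFind lst x
  match lst.drop i with
  | y :: _ => if y == x then lst else lst.take i ++ [x] ++ lst.drop i
  | [] => lst.take i ++ [x] ++ lst.drop i

def prefix_to_json_alt (prefixes : List String) : List (String × List (String × List String)) :=
  let folders : PySem.Dict String (List String) :=
    prefixes.foldl (fun d p =>
      match pvPartsB p with
      | [] => d
      | [_] => d
      | top :: sub :: _ => d.insert top (insertSortedUnique (d.getD top []) sub)) PySem.Dict.empty
  [("data_source", folders.items)]

-- ===== PRECONDITION & SPEC =====
def Spec_prefix_to_json (prefixes : List String) (out : List (String × List (String × List String))) : Prop := out = prefix_to_json_alt prefixes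
instance (prefixes : List String) (out : List (String × List (String × List String))) : Decidable (Spec_prefix_to_json prefixes out) := by unfold Spec_prefix_to_json; infer_instance

-- ===== CLAIM (what is proved, stated in full; the proofs are below) =====
def Claim_equal_prefix_to_json : Prop := ∀ (prefixes : List String), Dom_prefix_to_json prefixes → Spec_prefix_to_json prefixes (prefix_to_json prefixes)

-- ===== LEMMAS AND PROOFS =====

-- the plain structural recursion insertSortedUnique computes
def siuRec (lst : List String) (x : String) : List String :=
  match lst with
  | [] => [x]
  | y :: ys => if y < x then y :: siuRec ys x else if y == x then y :: ys else x :: y :: ys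

lemma isu_eq_rec (lst : List String) (x : String) : insertSortedUnique lst x = siuRec lst x := by
  induction lst with
  | nil => rfl
  | cons y ys ih =>
    simp only [insertSortedUnique, siuRec, pvIsuFind] at *
    by_cases h : y < x
    · simp only [h, if_pos]
      cases hd : (ys.drop (pvIsuFind ys x)) with
      | nil => simp [hd] at ih ⊢; rw [← ih]
      | cons z zs =>
        simp [hd] at ih ⊢
        by_cases hz : z = x
        · simp [hz] at ih ⊢; exact ih
        · simp [hz] at ih ⊢; rw [← ih]
    · simp [h]

lemma mem_siuRec (lst : List String) (x a : String) : a ∈ siuRec lst x ↔ a = x ∨ a ∈ lst := by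
  induction lst with
  | nil => simp [siuRec]
  | cons y ys ih =>
    simp only [siuRec]
    split_ifs with h1 h2
    · simp only [List.mem_cons, ih]; tauto
    · have hyx : y = x := by simpa using h2
      subst hyx
      simp only [List.mem_cons]
      tauto
    · simp only [List.mem_cons]

lemma siuRec_of_mem (lst : List String) (x : String) (hs : lst.Pairwise (· < ·))
    (hx : x ∈ lst) : siuRec lst x = lst := by
  induction lst with
  | nil => simp at hx
  | cons y ys ih =>
    rcases List.mem_cons.mp hx with h | h
    · subst h
      simp [siuRec]
    · have hy : y < x := (List.pairwise_cons.mp hs).1 x h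
      simp [siuRec, hy, ih (List.pairwise_cons.mp hs).2 h]

lemma siuRec_perm (lst : List String) (x : String) (hx : x ∉ lst) :
    (siuRec lst x).Perm (x :: lst) := by
  induction lst with
  | nil => simp [siuRec]
  | cons y ys ih =>
    have hxy : ¬ x = y := fun h => hx (h ▸ List.mem_cons_self)
    have hxys : x ∉ ys := fun h => hx (List.mem_cons_of_mem _ h)
    simp only [siuRec]
    split_ifs with h1 h2
    · exact ((ih hxys).cons y).trans (List.Perm.swap x y ys)
    · have : y = x := by simpa using h2
      exact absurd this.symm hxy
    · exact List.Perm.refl _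

lemma siuRec_pairwise (lst : List String) (x : String) (hs : lst.Pairwise (· < ·)) :
    (siuRec lst x).Pairwise (· < ·) := by
  induction lst with
  | nil => simp [siuRec]
  | cons y ys ih =>
    rcases List.pairwise_cons.mp hs with ⟨hy, hys⟩
    simp only [siuRec]
    split_ifs with h1 h2
    · refine List.pairwise_cons.mpr ⟨?_, ih hys⟩
      intro a ha
      rcases (mem_siuRec ys x a).mp ha with h | h
      · exact h ▸ h1
      · exact hy a h
    · exact hs
    · have hne : ¬ y = x := by simpa using h2
      have hxy : x < y := lt_of_le_of_ne (not_lt.mp h1) (fun h => hne h.symm)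
      refine List.pairwise_cons.mpr ⟨?_, hs⟩
      intro a ha
      rcases List.mem_cons.mp ha with h | h
      · exact h ▸ hxy
      · exact hxy.trans (hy a h)

lemma sorted_pairwise_lt (v : List String) (hnd : v.Nodup) :
    (PySem.List.sorted v (fun x => x)).Pairwise (· < ·) := by
  have hperm : (PySem.List.sorted v (fun x => x)).Perm v := PySem.List.sorted_perm v _ _
  have hnd' : (PySem.List.sorted v (fun x => x)).Nodup := hperm.nodup_iff.mpr hnd
  have hle := PySem.List.sorted_pairwise v (fun x => x)
  exact (hle.and hnd').imp (fun h => lt_of_le_of_ne h.1 h.2)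

-- the central fact: incremental sorted insertion = set-add then sort
lemma siu_sorted (v : List String) (s : String) (hnd : v.Nodup) :
    insertSortedUnique (PySem.List.sorted v (fun x => x)) s
      = PySem.List.sorted (PySem.Set.add v s) (fun x => x) := by
  rw [isu_eq_rec]
  have hperm : (PySem.List.sorted v (fun x => x)).Perm v := PySem.List.sorted_perm v _ _
  have hlt := sorted_pairwise_lt v hnd
  by_cases hs : s ∈ v
  · have hv : PySem.Set.add v s = v := by
      simp [PySem.Set.add, hs]
    rw [hv, siuRec_of_mem _ _ hlt (hperm.mem_iff.mpr hs)]
  · have hv : PySem.Set.add v s = v ++ [s] := by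
      simp [PySem.Set.add, hs]
    rw [hv]
    symm
    apply PySem.List.sorted_eq_of_perm_of_pairwise_lt
    · have h1 : s ∉ PySem.List.sorted v (fun x => x) := fun h => hs (hperm.subset h)
      exact (siuRec_perm _ _ h1).trans
        ((hperm.cons s).trans (List.perm_append_singleton s v).symm)
    · exact siuRec_pairwise _ _ hlt

-- the value map relating B's dict entries to A's
def pvF (kv : String × PySem.Set String) : String × List String :=
  (kv.1, PySem.List.sorted kv.2 (fun x => x))

lemma getD_map_items (l : List (String × PySem.Set String)) (k : String) :
    (PySem.Dict.mk (l.map pvF)).getD k []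
      = PySem.List.sorted ((PySem.Dict.mk (ν := PySem.Set String) l).getD k []) (fun x => x) := by
  induction l with
  | nil => rfl
  | cons a t ih =>
    simp only [PySem.Dict.getD, PySem.Dict.get?, List.map_cons, List.find?] at *
    by_cases h : a.1 == k
    · simp [pvF, h]
    · simp only [pvF] at *
      simp [h] at ih ⊢
      exact ih

lemma insert_map_items (l : List (String × PySem.Set String)) (k : String) (v : PySem.Set String) :
    (PySem.Dict.mk (l.map pvF)).insert k (PySem.List.sorted v (fun x => x))
      = PySem.Dict.mk (((PySem.Dict.mk l).insert k v).items.map pvF) := by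
  have hc : (PySem.Dict.mk (l.map pvF)).contains k
      = (PySem.Dict.mk (ν := PySem.Set String) l).contains k := by
    simp only [PySem.Dict.contains, List.any_map]
    rfl
  simp only [PySem.Dict.insert, hc]
  by_cases h : (PySem.Dict.mk (ν := PySem.Set String) l).contains k
  · simp only [h, if_pos]
    congr 1
    simp only [List.map_map]
    apply List.map_congr_left
    intro p _
    by_cases hp : p.1 = k
    · simp [pvF, hp]
    · simp [pvF, hp]
  · simp only [h, if_neg, Bool.false_eq_true, not_false_iff]
    congr 1
    simp [pvF]

lemma mem_insert_items (l : List (String × PySem.Set String)) (k : String) (v : PySem.Set String)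
    (kv : String × PySem.Set String) (h : kv ∈ ((PySem.Dict.mk l).insert k v).items) :
    kv.2 = v ∨ kv ∈ l := by
  simp only [PySem.Dict.insert] at h
  by_cases hc : (PySem.Dict.mk (ν := PySem.Set String) l).contains k
  · simp only [hc, if_pos] at h
    rcases List.mem_map.mp h with ⟨p, hp, hEq⟩
    by_cases hk : p.1 == k
    · left; rw [← hEq]; simp [hk]
    · right; rw [← hEq]; simp [hk]; exact hp
  · simp only [hc, if_neg, Bool.false_eq_true, not_false_iff] at h
    rcases List.mem_append.mp h with h | h
    · right; exact h
    · left; simp at h; rw [h]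

lemma getD_nodup (l : List (String × PySem.Set String)) (k : String)
    (h : ∀ kv ∈ l, List.Nodup kv.2) :
    List.Nodup ((PySem.Dict.mk (ν := PySem.Set String) l).getD k []) := by
  simp only [PySem.Dict.getD, PySem.Dict.get?]
  cases hf : l.find? (fun p => p.1 == k) with
  | none => simp
  | some p =>
    simp only [Option.map_some, Option.getD_some]
    exact h p (List.mem_of_find?_eq_some hf)

-- the fold invariant: B's dict is A's dict with every value sorted
lemma fold_inv (ps : List String) (da : PySem.Dict String (PySem.Set String))
    (db : PySem.Dict String (List String))
    (h1 : db.items = da.items.map pvF)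
    (h2 : ∀ kv ∈ da.items, List.Nodup kv.2) :
    (ps.foldl (fun d p =>
      match pvPartsB p with
      | [] => d
      | [_] => d
      | top :: sub :: _ => d.insert top (insertSortedUnique (d.getD top []) sub)) db).items
    = ((ps.foldl (fun d p =>
      match pvPartsA p with
      | top_level :: sub_folder :: _ =>
          d.modify top_level PySem.Set.empty (fun v => v.add sub_folder)
      | _ => d) da)).items.map pvF := by
  induction ps generalizing da db with
  | nil => simpa using h1
  | cons p ps ih =>
    simp only [List.foldl_cons]
    have hPP : pvPartsB p = pvPartsA p := rfl
    rw [hPP]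
    cases hp : pvPartsA p with
    | nil => exact ih da db h1 h2
    | cons t rest =>
      cases rest with
      | nil => exact ih da db h1 h2
      | cons s rest2 =>
        have hdb : db = PySem.Dict.mk (da.items.map pvF) := PySem.Dict.ext h1
        have hda : da = PySem.Dict.mk da.items := rfl
        have hval : insertSortedUnique (db.getD t []) s
            = PySem.List.sorted (PySem.Set.add (da.getD t PySem.Set.empty) s) (fun x => x) := by
          rw [hdb, getD_map_items]
          exact siu_sorted _ s (getD_nodup da.items t h2)
        apply ih
        · -- items relation after one step
          show (db.insert t (insertSortedUnique (db.getD t []) s)).items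
              = (da.modify t PySem.Set.empty (fun v => v.add s)).items.map pvF
          rw [hval, PySem.Dict.modify]
          rw [hdb]
          rw [insert_map_items]
        · intro kv hkv
          simp only [PySem.Dict.modify] at hkv
          rcases mem_insert_items da.items t _ kv hkv with h | h
          · rw [h]
            exact PySem.Set.nodup_add _ s (getD_nodup da.items t h2)
          · exact h2 kv h

-- ===== VERDICT (by name: the statement is the Claim_ definition above) =====
theorem prefix_to_json_spec : Claim_equal_prefix_to_json := by
  intro prefixes _
  show prefix_to_json prefixes = prefix_to_json_alt prefixes
  simp only [prefix_to_json, prefix_to_json_alt]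
  have := fold_inv prefixes PySem.Dict.empty PySem.Dict.empty rfl (by intro kv h; simp [PySem.Dict.empty] at h)
  rw [this]
  rfl
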